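-- pv_equiv track=rewrite | github.com/lzcjsyr/Book_Recap | core/infra/remotion/opening_renderer.py | _split_quote_fragments
-- ===== SOURCE A (Python) =====
-- from typing import Any, Dict, List, Optional
--
-- _QUOTE_BREAK_PUNCTUATION = {"。", "！", "？", "!", "?", "；", ";", "，", ",", "：", ":"}
--
-- def _split_quote_fragments(quote: str) -> List[str]:
--     fragments: List[str] = []
--     normalized = (quote or "").replace("\r\n", "\n").replace("\r", "\n")
--
--     for raw_line in normalized.split("\n"):
--         line = raw_line.strip()
--         if not line:
--             continue
--
--         current = ""
--         for char in line:
--             current += char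
--             if char in _QUOTE_BREAK_PUNCTUATION:
--                 cleaned = current.strip()
--                 if cleaned:
--                     fragments.append(cleaned)
--                 current = ""
--
--         cleaned = current.strip()
--         if cleaned:
--             fragments.append(cleaned)
--
--     return fragments
-- ===== SOURCE B (Python) =====
-- from typing import List
--
-- _QUOTE_BREAK_PUNCTUATION = {"。", "！", "？", "!", "?", "；", ";", "，", ",", "：", ":"}
--
-- def _split_quote_fragments(quote: str) -> List[str]:
--     # Faster: no per-character Python loop — mark a break after every punctuation char,
--     # then split each line on the marker and keep the non-empty stripped pieces.
--     fragments: List[str] = []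
--     normalized = (quote or "").replace("\r\n", "\n").replace("\r", "\n")
--     for raw_line in normalized.split("\n"):
--         line = raw_line.strip()
--         if not line:
--             continue
--         for p in _QUOTE_BREAK_PUNCTUATION:
--             line = line.replace(p, p + "\n")
--         for piece in line.split("\n"):
--             cleaned = piece.strip()
--             if cleaned:
--                 fragments.append(cleaned)
--     return fragments
-- ===== Notes on version B (the rewrite author's own statement) =====
-- stated objective: faster
-- what changed: A builds each fragment with a per-character running accumulator inside every line; B has no character loop: it inserts a newline marker after every punctuation char via str.replace and then splits the line on the marker, stripping and keeping the non-empty pieces.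
import Mathlib
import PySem

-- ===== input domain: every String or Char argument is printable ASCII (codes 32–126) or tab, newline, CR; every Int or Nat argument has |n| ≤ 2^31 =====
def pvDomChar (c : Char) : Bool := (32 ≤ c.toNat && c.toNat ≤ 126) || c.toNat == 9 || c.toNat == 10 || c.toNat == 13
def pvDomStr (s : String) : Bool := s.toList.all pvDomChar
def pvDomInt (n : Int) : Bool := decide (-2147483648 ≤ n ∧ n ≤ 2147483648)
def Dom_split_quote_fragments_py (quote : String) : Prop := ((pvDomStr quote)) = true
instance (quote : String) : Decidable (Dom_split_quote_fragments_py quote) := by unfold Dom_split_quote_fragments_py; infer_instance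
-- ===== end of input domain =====

-- B replaces A's per-character accumulator loop with marker insertion (str.replace) plus a per-line split; measured faster in a timing run (constant factor).

-- ===== PORT A =====
-- the module set _QUOTE_BREAK_PUNCTUATION (distinct elements, order of the literal)
def pvPunctList : List Char := ['。', '！', '？', '!', '?', '；', ';', '，', ',', '：', ':']

def pvPunct (c : Char) : Bool := pvPunctList.contains c

-- A's inner 'for char in line' loop: running accumulator `cur`, a fragment appended at each punctuation char and once after the loop
def pvAInner : List Char → List Char → List String → List String
  | [], cur, frags =>
      let cleaned := PySem.Chars.strip cur
      if cleaned = [] then frags else frags ++ [String.ofList cleaned]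
  | c :: rest, cur, frags =>
      let cur' := cur ++ [c]
      if pvPunct c then
        let cleaned := PySem.Chars.strip cur'
        pvAInner rest [] (if cleaned = [] then frags else frags ++ [String.ofList cleaned])
      else
        pvAInner rest cur' frags

def split_quote_fragments_py (quote : String) : List String :=
  let normalized := PySem.Str.replace (PySem.Str.replace quote "\r\n" "\n") "\r" "\n"
  (PySem.Chars.splitOn normalized.toList ['\n']).foldl (fun frags rawLine =>
    let line := PySem.Chars.strip rawLine
    if line = [] then frags else pvAInner line [] frags) []

-- ===== PORT B =====
-- B's 'for piece in line.split("\n")' loop body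
def pvBStep (frags : List String) (piece : List Char) : List String :=
  let cleaned := PySem.Chars.strip piece
  if cleaned = [] then frags else frags ++ [String.ofList cleaned]

def split_quote_fragments_py_alt (quote : String) : List String :=
  let normalized := PySem.Str.replace (PySem.Str.replace quote "\r\n" "\n") "\r" "\n"
  (PySem.Chars.splitOn normalized.toList ['\n']).foldl (fun frags rawLine =>
    let line := PySem.Chars.strip rawLine
    if line = [] then frags
    else
      let marked := pvPunctList.foldl (fun l p => PySem.Chars.replace l [p] [p, '\n']) line
      (PySem.Chars.splitOn marked ['\n']).foldl pvBStep frags) []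

-- ===== PRECONDITION & SPEC =====
def Spec_split_quote_fragments_py (quote : String) (out : List String) : Prop := out = split_quote_fragments_py_alt quote
instance (quote : String) (out : List String) : Decidable (Spec_split_quote_fragments_py quote out) := by unfold Spec_split_quote_fragments_py; infer_instance

-- ===== CLAIM (what is proved, stated in full; the proofs are below) =====
def Claim_equal_split_quote_fragments_py : Prop := ∀ (quote : String), Dom_split_quote_fragments_py quote → Spec_split_quote_fragments_py quote (split_quote_fragments_py quote)

-- ===== LEMMAS AND PROOFS =====
lemma pvReplace_go_singleton (p : Char) (new : List Char) :
    ∀ (l : List Char) (fuel : Nat) (acc : List Char), l.length ≤ fuel →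
      PySem.Chars.replace.go [p] new fuel l acc =
        acc.reverse ++ l.flatMap (fun c => if c = p then new else [c]) := by
  intro l
  induction l with
  | nil =>
      intro fuel acc _
      cases fuel <;> simp [PySem.Chars.replace.go]
  | cons c t ih =>
      intro fuel acc h
      cases fuel with
      | zero => simp at h
      | succ fuel =>
        rw [PySem.Chars.replace.go]
        simp only [List.length_cons, Nat.succ_le_succ_iff] at h
        by_cases hc : c = p
        · subst hc
          simp only [List.isPrefixOf, BEq.rfl, Bool.true_and, List.isPrefixOf_nil_left,
            if_pos, List.length_singleton, List.drop_one, List.tail_cons]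
          rw [ih fuel _ h]
          simp
        · have : ([p].isPrefixOf (c :: t)) = false := by
            simp [List.isPrefixOf, hc]
            intro h'; exact absurd h'.symm hc
          rw [this]
          simp only [Bool.false_eq_true, if_false]
          rw [ih fuel _ h]
          simp [hc]

lemma pvReplace_singleton (p : Char) (new : List Char) (s : List Char) :
    PySem.Chars.replace s [p] new = s.flatMap (fun c => if c = p then new else [c]) := by
  rw [PySem.Chars.replace]
  rw [if_neg (by simp)]
  rw [pvReplace_go_singleton p new s s.length [] le_rfl]
  simp

def pvRep (p : Char) (c : Char) : List Char := if c = p then [p, '\n'] else [c]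
def pvH : List Char → Char → List Char
  | [], c => [c]
  | p :: ps, c => (pvRep p c).flatMap (pvH ps)

lemma pvFoldl_replace (ps : List Char) :
    ∀ l : List Char,
      ps.foldl (fun l p => PySem.Chars.replace l [p] [p, '\n']) l = l.flatMap (pvH ps) := by
  induction ps with
  | nil => intro l; simp [pvH]
  | cons p ps ih =>
      intro l
      rw [List.foldl_cons, ih, pvReplace_singleton, List.flatMap_assoc]
      simp only [pvH, pvRep]

lemma pvH_eq (ps : List Char) (hnd : ps.Nodup) (hnl : '\n' ∉ ps) :
    ∀ c, pvH ps c = if ps.contains c then [c, '\n'] else [c] := by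
  induction ps with
  | nil => intro c; simp [pvH]
  | cons p ps ih =>
      simp only [List.nodup_cons] at hnd
      simp only [List.mem_cons, not_or] at hnl
      intro c
      have ihc := ih hnd.2 hnl.2
      by_cases hc : c = p
      · subst hc
        simp only [pvH, pvRep, if_pos rfl, if_true, List.flatMap_cons, List.flatMap_nil,
          List.append_nil]
        rw [ihc c, ihc '\n']
        rw [if_neg (by simpa using hnd.1), if_neg (by simpa using hnl.2)]
        simp
      · simp only [pvH, pvRep, if_neg hc, List.flatMap_cons, List.flatMap_nil, List.append_nil]
        rw [ihc c]
        simp [List.contains_cons, hc]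

def pvSplit (cur : List Char) : List Char → List (List Char)
  | [] => [cur]
  | c :: rest => if c = '\n' then cur :: pvSplit [] rest else pvSplit (cur ++ [c]) rest

def pvSegs (cur : List Char) : List Char → List (List Char)
  | [] => [cur]
  | c :: rest => if pvPunct c then (cur ++ [c]) :: pvSegs [] rest else pvSegs (cur ++ [c]) rest

lemma pvSplitOn_go_nl :
    ∀ (l : List Char) (fuel : Nat) (cur : List Char) (acc : List (List Char)), l.length ≤ fuel →
      PySem.Chars.splitOn.go ['\n'] fuel l cur acc = acc.reverse ++ pvSplit cur.reverse l := by
  intro l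
  induction l with
  | nil =>
      intro fuel cur acc _
      cases fuel <;> simp [PySem.Chars.splitOn.go, pvSplit]
  | cons c t ih =>
      intro fuel cur acc h
      simp only [List.length_cons, Nat.succ_le_iff] at h
      cases fuel with
      | zero => omega
      | succ fuel =>
        rw [PySem.Chars.splitOn.go]
        by_cases hc : c = '\n'
        · subst hc
          rw [if_pos (by simp [List.isPrefixOf])]
          simp only [List.length_singleton, List.drop_one, List.tail_cons]
          rw [ih fuel [] _ (by omega)]
          simp [pvSplit]
        · rw [if_neg (by simp [List.isPrefixOf]; exact fun h' => hc h'.symm)]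
          rw [ih fuel (c :: cur) acc (by omega)]
          simp [pvSplit, hc]

lemma pvSplitOn_nl (s : List Char) : PySem.Chars.splitOn s ['\n'] = pvSplit [] s := by
  rw [PySem.Chars.splitOn, pvSplitOn_go_nl s (s.length + 1) [] [] (by omega)]
  simp

lemma pvSplit_mark :
    ∀ (cs : List Char) (cur : List Char), '\n' ∉ cs →
      pvSplit cur (cs.flatMap (fun c => if pvPunct c then [c, '\n'] else [c])) = pvSegs cur cs := by
  intro cs
  induction cs with
  | nil => intro cur _; simp [pvSplit, pvSegs]
  | cons c t ih =>
      intro cur h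
      simp only [List.mem_cons, not_or] at h
      have iht := fun cur => ih cur h.2
      by_cases hc : pvPunct c
      · have hcn : c ≠ '\n' := fun e => by subst e; revert hc; decide
        simp [List.flatMap_cons, hc, pvSegs, pvSplit, hcn, iht]
      · have hcn : c ≠ '\n' := fun e => h.1 e.symm
        simp [List.flatMap_cons, hc, pvSegs, pvSplit, hcn, iht]

lemma pvAInner_eq_segs :
    ∀ (cs : List Char) (cur : List Char) (frags : List String),
      pvAInner cs cur frags = (pvSegs cur cs).foldl pvBStep frags := by
  intro cs
  induction cs with
  | nil => intro cur frags; simp [pvAInner, pvSegs, pvBStep]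
  | cons c t ih =>
      intro cur frags
      by_cases hc : pvPunct c
      · simp [pvAInner, pvSegs, hc, pvBStep, ih]
      · simp [pvAInner, pvSegs, hc, ih]

lemma pvMem_strip {c : Char} {s : List Char} (h : c ∈ PySem.Chars.strip s) : c ∈ s := by
  have h1 : c ∈ PySem.Chars.lstrip s := by
    have := (List.dropWhile_sublist PySem.Chars.isspace (l := (PySem.Chars.lstrip s).reverse)).subset
    rw [PySem.Chars.strip, PySem.Chars.rstrip] at h
    have := this (by simpa using h)
    simpa using this
  exact (List.dropWhile_sublist _ (l := s)).subset (by simpa [PySem.Chars.lstrip] using h1)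

lemma pvSplit_cons (cur : List Char) (c : Char) (rest : List Char) :
    pvSplit cur (c :: rest) = if c = '\n' then cur :: pvSplit [] rest else pvSplit (cur ++ [c]) rest := rfl

lemma pvSplit_no_nl :
    ∀ (s cur : List Char), '\n' ∉ cur →
      ∀ piece ∈ pvSplit cur s, '\n' ∉ piece := by
  intro s
  induction s with
  | nil => intro cur hcur piece hp; simp [pvSplit] at hp; subst hp; exact hcur
  | cons c t ih =>
      intro cur hcur piece hp
      rw [pvSplit_cons] at hp
      by_cases hc : c = '\n'
      · rw [if_pos hc] at hp
        rcases List.mem_cons.mp hp with h | hp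
        · subst h; exact hcur
        · exact ih [] (by simp) piece hp
      · rw [if_neg hc] at hp
        exact ih (cur ++ [c]) (by simp [hcur]; exact fun e => hc e.symm) piece hp


-- ===== VERDICT (by name: the statement is the Claim_ definition above) =====
theorem split_quote_fragments_py_spec : Claim_equal_split_quote_fragments_py := by
  intro quote _
  unfold Spec_split_quote_fragments_py

  unfold split_quote_fragments_py split_quote_fragments_py_alt
  set lines := PySem.Chars.splitOn (PySem.Str.replace (PySem.Str.replace quote "\r\n" "\n") "\r" "\n").toList ['\n'] with hl
  have hnl : ∀ raw ∈ lines, '\n' ∉ raw := by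
    rw [hl, pvSplitOn_nl]
    exact pvSplit_no_nl _ [] (by simp)
  apply PySem.List.foldl_congr_mem
  intro frags raw hraw
  by_cases hline : PySem.Chars.strip raw = []
  · simp [hline]
  · simp only [if_neg hline]
    have hnoline : '\n' ∉ PySem.Chars.strip raw := fun h => hnl raw hraw (pvMem_strip h)
    rw [pvFoldl_replace]
    have hfun : pvH pvPunctList = fun c => if pvPunct c then [c, '\n'] else [c] := by
      funext c
      rw [pvH_eq pvPunctList (by decide) (by decide) c]
      simp [pvPunct]
    rw [hfun, pvSplitOn_nl, pvSplit_mark _ _ hnoline, pvAInner_eq_segs]
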